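-- pv_equiv track=rewrite | github.com/snowmanhenrik/miscellaneous-Python | gym.py | bestMachine
-- ===== SOURCE A (Python) =====
-- def bestMachine(machines:list,rating:list):
--     highestRated = []
--     for i in range(len(rating)):
--         if rating[i] == max(rating):
--             tuplelist = (machines[i],rating[i])
--             highestRated.append(tuplelist)
--     highestRated.sort()
--     return highestRated
-- ===== SOURCE B (Python) =====
-- def bestMachine(machines: list, rating: list):
--     # Single forward pass: track the running maximum and the indices tying it,
--     # instead of recomputing max(rating) on every iteration.
--     best = None
--     idxs = []
--     for i, r in enumerate(rating):
--         if best is None or r > best: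
--             best = r
--             idxs = [i]
--         elif r == best:
--             idxs.append(i)
--     out = [(machines[i], rating[i]) for i in idxs]
--     out.sort()
--     return out
-- ===== Notes on version B (the rewrite author's own statement) =====
-- stated objective: faster
-- what changed: B replaces A's loop that recomputes max(rating) on every iteration with a single running-maximum pass collecting the tying indices, then builds and sorts only those tuples.
import Mathlib
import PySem

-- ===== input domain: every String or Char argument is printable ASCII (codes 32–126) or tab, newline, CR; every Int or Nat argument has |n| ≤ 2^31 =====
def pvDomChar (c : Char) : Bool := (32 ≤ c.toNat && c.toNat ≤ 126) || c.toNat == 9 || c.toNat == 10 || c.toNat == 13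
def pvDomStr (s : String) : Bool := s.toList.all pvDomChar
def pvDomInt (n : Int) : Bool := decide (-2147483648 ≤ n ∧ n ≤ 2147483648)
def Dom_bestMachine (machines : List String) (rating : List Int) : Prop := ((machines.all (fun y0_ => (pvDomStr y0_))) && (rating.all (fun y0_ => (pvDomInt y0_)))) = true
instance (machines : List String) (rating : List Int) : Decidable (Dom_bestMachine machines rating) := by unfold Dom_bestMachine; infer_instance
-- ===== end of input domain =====

-- B replaces A's quadratic loop (which recomputes max(rating) on every iteration) by a single
-- running-maximum pass collecting the tying indices; objective: faster (asymptotic).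


-- ===== PORT A =====
-- A's loop body: for each (i, rating[i]) — if rating[i] == max(rating): append (machines[i], rating[i]);
-- a failing machines[i] (IndexError) makes the whole state none.
def aStep (machines : List String) (rating : List Int)
    (acc : Option (List (String × Int))) (p : Int × Int) : Option (List (String × Int)) :=
  match acc with
  | none => none
  | some hs =>
    if some p.2 = PySem.List.max? rating (fun y => y) then
      match PySem.List.pyGet? machines p.1 with
      | some mach => some (hs ++ [(mach, p.2)])
      | none => none
    else some hs

def bestMachine (machines : List String) (rating : List Int) : List (String × Int) :=
  match (PySem.List.enumerate rating).foldl (aStep machines rating) (some []) with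
  | some hs => PySem.List.sorted2 hs (fun t => t.1) (fun t => t.2)
  | none => []   -- unreachable under Pre_bestMachine (Python raises IndexError there)

-- ===== PORT B =====
-- B's running-max step over (index, value) pairs.
def bStep (st : Option Int × List Int) (p : Int × Int) : Option Int × List Int :=
  match st.1 with
  | none => (some p.2, [p.1])
  | some b =>
    if b < p.2 then (some p.2, [p.1])
    else if p.2 = b then (some b, st.2 ++ [p.1])
    else (some b, st.2)

-- B's final comprehension step: (machines[i], rating[i]) for i in idxs.
def bGet (machines : List String) (rating : List Int)
    (acc : Option (List (String × Int))) (i : Int) : Option (List (String × Int)) :=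
  match acc, PySem.List.pyGet? machines i, PySem.List.pyGet? rating i with
  | some l, some mach, some r => some (l ++ [(mach, r)])
  | _, _, _ => none

def bestMachine_alt (machines : List String) (rating : List Int) : List (String × Int) :=
  let st := (PySem.List.enumerate rating).foldl bStep (none, [])
  match st.2.foldl (bGet machines rating) (some []) with
  | some out => PySem.List.sorted2 out (fun t => t.1) (fun t => t.2)
  | none => []   -- unreachable under Pre_bestMachine

-- ===== PRECONDITION & SPEC =====
-- Pre_ excludes exactly the inputs where Python A raises IndexError: a position of the maximal
-- rating that has no corresponding machine. A returns on every input admitted here.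
def Pre_bestMachine (machines : List String) (rating : List Int) : Prop :=
  ∀ i : Fin rating.length, (∀ y ∈ rating, y ≤ rating[i]) → (i : Nat) < machines.length
instance (machines : List String) (rating : List Int) : Decidable (Pre_bestMachine machines rating) := by unfold Pre_bestMachine; infer_instance
def pvWitness_bestMachine : List String × List Int := (["a", "b"], [1, 2])

def Spec_bestMachine (machines : List String) (rating : List Int) (out : List (String × Int)) : Prop := out = bestMachine_alt machines rating
instance (machines : List String) (rating : List Int) (out : List (String × Int)) : Decidable (Spec_bestMachine machines rating out) := by unfold Spec_bestMachine; infer_instance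

-- ===== CLAIM (what is proved, stated in full; the proofs are below) =====
def Claim_equal_bestMachine : Prop := ∀ (machines : List String) (rating : List Int), Dom_bestMachine machines rating → Pre_bestMachine machines rating → Spec_bestMachine machines rating (bestMachine machines rating)

-- ===== LEMMAS AND PROOFS =====

-- the running maximum never decreases
lemma le_runMax (l : List (Int × Int)) (b : Int) :
    b ≤ l.foldl (fun a p => max a p.2) b := by
  induction l generalizing b with
  | nil => simp
  | cons p t ih => exact le_trans (le_max_left b p.2) (ih (max b p.2))

-- characterization of B's running-max fold: final best = running max, final idxs = positions
-- (in order) of the overall max, preceded by the seed idxs iff the seed best is still maximal.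
lemma bfold_char (l : List (Int × Int)) (b : Int) (idxs : List Int) :
    l.foldl bStep (some b, idxs) =
      (some (l.foldl (fun a p => max a p.2) b),
       (if l.foldl (fun a p => max a p.2) b = b then idxs else []) ++
         (l.filter (fun p => p.2 = l.foldl (fun a p => max a p.2) b)).map (fun p => p.1)) := by
  induction l generalizing b idxs with
  | nil => simp
  | cons p t ih =>
    have hM : (p :: t).foldl (fun a p => max a p.2) b = t.foldl (fun a p => max a p.2) (max b p.2) := rfl
    by_cases h1 : b < p.2
    · have hstep : bStep (some b, idxs) p = (some p.2, [p.1]) := by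
        simp [bStep, h1]
      have hmax : max b p.2 = p.2 := max_eq_right (le_of_lt h1)
      rw [List.foldl_cons, hstep, ih, hM, hmax]
      have hMne : ¬ t.foldl (fun a p => max a p.2) p.2 = b := by
        have := le_runMax t p.2; omega
      by_cases h2 : t.foldl (fun a p => max a p.2) p.2 = p.2
      · simp [h2, hMne, List.filter_cons]
        intro h; omega
      · simp [h2, hMne, List.filter_cons]
        rw [if_neg (fun h => h2 h.symm)]
    · by_cases h2 : p.2 = b
      · have hstep : bStep (some b, idxs) p = (some b, idxs ++ [p.1]) := by
          simp [bStep, h1, h2]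
        have hmax : max b p.2 = b := by rw [h2, max_self]
        rw [List.foldl_cons, hstep, ih, hM, hmax]
        by_cases h3 : t.foldl (fun a p => max a p.2) b = b
        · simp [h3, List.filter_cons, h2, h3]
        · simp [h3, List.filter_cons]
          rw [if_neg (by rw [h2]; exact fun h => h3 h.symm)]
      · have hlt : p.2 < b := by omega
        have hstep : bStep (some b, idxs) p = (some b, idxs) := by
          simp [bStep, h1, h2]
        have hmax : max b p.2 = b := max_eq_left (le_of_lt hlt)
        rw [List.foldl_cons, hstep, ih, hM, hmax]
        have hne : ¬ p.2 = t.foldl (fun a p => max a p.2) b := by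
          have := le_runMax t b; omega
        simp [List.filter_cons, hne]

-- A's fold appends exactly the filtered pairs, provided machines[i] succeeds at each of them
lemma afold (machines : List String) (rating : List Int) (l : List (Int × Int))
    (acc : List (String × Int))
    (hget : ∀ p ∈ l, some p.2 = PySem.List.max? rating (fun y => y) →
      (PySem.List.pyGet? machines p.1).isSome) :
    l.foldl (aStep machines rating) (some acc) =
      some (acc ++ (l.filter (fun p => decide (some p.2 = PySem.List.max? rating (fun y => y)))).map
        (fun p => ((PySem.List.pyGet? machines p.1).getD "", p.2))) := by
  induction l generalizing acc with
  | nil => simp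
  | cons p t ih =>
    by_cases hc : some p.2 = PySem.List.max? rating (fun y => y)
    · obtain ⟨s, hs⟩ := Option.isSome_iff_exists.mp (hget p (by simp) hc)
      have hstep : aStep machines rating (some acc) p = some (acc ++ [(s, p.2)]) := by
        simp [aStep, hc, hs]
      rw [List.foldl_cons, hstep, ih _ (fun q hq => hget q (by simp [hq]))]
      simp [List.filter_cons, hc, hs]
    · have hstep : aStep machines rating (some acc) p = some acc := by
        simp [aStep, hc]
      rw [List.foldl_cons, hstep, ih _ (fun q hq => hget q (by simp [hq]))]
      simp [List.filter_cons, hc]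

-- B's comprehension fold, provided both lookups succeed at each index
lemma bgetfold (machines : List String) (rating : List Int) (idxs : List Int)
    (acc : List (String × Int))
    (h : ∀ i ∈ idxs, (PySem.List.pyGet? machines i).isSome ∧ (PySem.List.pyGet? rating i).isSome) :
    idxs.foldl (bGet machines rating) (some acc) =
      some (acc ++ idxs.map
        (fun i => ((PySem.List.pyGet? machines i).getD "", (PySem.List.pyGet? rating i).getD 0))) := by
  induction idxs generalizing acc with
  | nil => simp
  | cons i t ih =>
    obtain ⟨s, hs⟩ := Option.isSome_iff_exists.mp (h i (by simp)).1
    obtain ⟨r, hr⟩ := Option.isSome_iff_exists.mp (h i (by simp)).2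
    have hstep : bGet machines rating (some acc) i = some (acc ++ [(s, r)]) := by
      simp [bGet, hs, hr]
    rw [List.foldl_cons, hstep, ih _ (fun j hj => h j (by simp [hj]))]
    simp [hs, hr]

-- ===== VERDICT (by name: the statement is the Claim_ definition above) =====
theorem bestMachine_spec : Claim_equal_bestMachine := by
  intro machines rating _ hpre
  unfold Spec_bestMachine bestMachine bestMachine_alt
  cases rating with
  | nil => rfl
  | cons r t =>
    have hmaxq : PySem.List.max? (r :: t) (fun y => y) = some (t.foldl max r) :=
      PySem.List.max?_id_cons r t
    have hisMax : ∀ y ∈ (r :: t), y ≤ t.foldl max r := by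
      have := PySem.List.max?_isMax hmaxq
      simpa using this
    have hE : PySem.List.enumerate (r :: t) 0 = ((0 : Int), r) :: PySem.List.enumerate t 1 := by
      rw [PySem.List.enumerate_cons]; norm_num
    -- every pair of the enumeration whose value is the max admits both lookups
    have hmem : ∀ p ∈ PySem.List.enumerate (r :: t) 0, p.2 = t.foldl max r →
        (PySem.List.pyGet? machines p.1).isSome ∧ (PySem.List.pyGet? (r :: t) p.1).isSome := by
      intro p hp hval
      obtain ⟨k, hk, rfl⟩ := (PySem.List.mem_enumerate_iff (r :: t) 0 p).mp hp
      simp only [zero_add] at hval ⊢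
      have hmach : k < machines.length := by
        apply hpre ⟨k, hk⟩
        intro y hy
        simp only [Fin.getElem_fin]
        calc y ≤ t.foldl max r := hisMax y hy
          _ = (r :: t)[k] := hval.symm
      constructor
      · simp [PySem.List.pyGet?_natCast, List.getElem?_eq_getElem hmach]
      · simp [PySem.List.pyGet?_natCast, List.getElem?_eq_getElem hk]
    -- A's fold
    rw [afold machines (r :: t) _ [] (by
      intro p hp hc
      exact (hmem p hp (by rw [hmaxq] at hc; exact (Option.some_inj.mp hc))).1)]
    -- B's running-max fold
    rw [hE, List.foldl_cons]
    have hb0 : bStep (none, []) ((0 : Int), r) = (some r, [(0 : Int)]) := rfl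
    rw [hb0, bfold_char]
    have hF : (PySem.List.enumerate t 1).foldl (fun a p => max a p.2) r = t.foldl max r := by
      conv_rhs => rw [← PySem.List.map_snd_enumerate t 1]
      rw [List.foldl_map]
    rw [hF]
    -- B's index list is exactly the max positions of the whole enumeration
    have hidxs :
        ((if t.foldl max r = r then [(0 : Int)] else []) ++
          ((PySem.List.enumerate t 1).filter (fun p => decide (p.2 = t.foldl max r))).map (fun p => p.1))
        = ((((0 : Int), r) :: PySem.List.enumerate t 1).filter
            (fun p => decide (p.2 = t.foldl max r))).map (fun p => p.1) := by
      rw [List.filter_cons]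
      by_cases h : r = t.foldl max r
      · simp [h.symm]
      · simp [h]
        exact fun hh => h hh.symm
    simp only [hidxs]
    rw [bgetfold machines (r :: t) _ [] (by
      intro i hi
      rw [List.mem_map] at hi
      obtain ⟨p, hp, rfl⟩ := hi
      rw [List.mem_filter] at hp
      exact hmem p (hE ▸ hp.1) (by simpa using hp.2))]
    -- both pre-sort lists are equal
    simp only [List.nil_append]
    congr 1
    have hfc : ((((0 : Int), r) :: PySem.List.enumerate t 1).filter
          (fun p => decide (some p.2 = PySem.List.max? (r :: t) fun y => y)))
        = ((((0 : Int), r) :: PySem.List.enumerate t 1).filter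
            (fun p => decide (p.2 = t.foldl max r))) := by
      apply List.filter_congr
      intro p _
      rw [hmaxq]
      simp
    rw [hfc, List.map_map]
    apply List.map_congr_left
    intro p hp
    rw [List.mem_filter] at hp
    obtain ⟨k, hk, rfl⟩ := (PySem.List.mem_enumerate_iff (r :: t) 0 p).mp (hE ▸ hp.1)
    simp [PySem.List.pyGet?_natCast, List.getElem?_eq_getElem hk]
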